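-- pv_equiv track=rewrite | github.com/khahnmad/MA-Thesis_Fringe-to-Familiar | Visualizations/in_latex/plot_num_keywordmatches.py | condense_results_by_year
-- ===== SOURCE A (Python) =====
-- def condense_results_by_year(results):
--     condensed = {}
--     for k in results.keys():
--         part = k[:-7]
--         if part not in condensed.keys():
--             condensed[part] = {}
--         for t in results[k].keys():
--             if t not in condensed[part].keys():
--                 condensed[part][t]= results[k][t]
--             else:
--                 condensed[part][t]+=results[k][t]
--     return condensed
-- ===== SOURCE B (Python) =====
-- def condense_results_by_year(results):
--     # Pass 1: bucket the original inner dicts by truncated key.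
--     groups = {}
--     for k in results:
--         groups.setdefault(k[:-7], []).append(results[k])
--     # Pass 2: merge each bucket's inner dicts, summing colliding keys.
--     condensed = {}
--     for part, inner_dicts in groups.items():
--         merged = {}
--         for inner in inner_dicts:
--             for t, v in inner.items():
--                 merged[t] = merged.get(t, 0) + v
--         condensed[part] = merged
--     return condensed
-- ===== Notes on version B (the rewrite author's own statement) =====
-- stated objective: alternative
-- what changed: A merges inner dicts into condensed[k[:-7]] in one interleaved loop with membership tests; B makes two passes: first bucket the inner dicts by truncated key, then merge each bucket with get(t,0)+v.
import Mathlib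
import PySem

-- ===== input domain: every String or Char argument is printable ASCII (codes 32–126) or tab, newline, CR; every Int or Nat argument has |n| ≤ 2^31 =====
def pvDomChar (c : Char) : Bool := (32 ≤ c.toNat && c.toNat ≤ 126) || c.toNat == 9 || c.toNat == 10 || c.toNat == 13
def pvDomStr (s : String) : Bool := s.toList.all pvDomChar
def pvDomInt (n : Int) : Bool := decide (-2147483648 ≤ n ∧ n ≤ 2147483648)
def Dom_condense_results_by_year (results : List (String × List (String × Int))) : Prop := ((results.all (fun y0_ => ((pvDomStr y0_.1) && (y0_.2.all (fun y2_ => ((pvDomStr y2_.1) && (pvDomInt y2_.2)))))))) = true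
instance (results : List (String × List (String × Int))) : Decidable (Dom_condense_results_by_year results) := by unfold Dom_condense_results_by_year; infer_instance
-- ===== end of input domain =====

-- B replaces A's single interleaved dict-of-dicts loop by two passes (bucket keys by prefix, then merge each bucket); same return value, alternative decomposition.


-- ===== PORT A =====
-- loop body of A's 'for k in results.keys()': part = k[:-7]; setdefault-style init; inner merge loop
def pvOuterStepA (condensed : PySem.Dict String (PySem.Dict String Int))
    (kv : String × List (String × Int)) : PySem.Dict String (PySem.Dict String Int) :=
  let part := PySem.Str.slice kv.1 none (some (-7))
  let condensed := if condensed.contains part then condensed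
                   else condensed.insert part PySem.Dict.empty
  kv.2.foldl (fun c tv =>
      if (c.getD part PySem.Dict.empty).contains tv.1 = false then
        c.modify part PySem.Dict.empty (fun m => m.insert tv.1 tv.2)
      else
        c.modify part PySem.Dict.empty (fun m => m.insert tv.1 (m.getD tv.1 0 + tv.2)))
    condensed

def condense_results_by_year (results : List (String × List (String × Int))) : List (String × List (String × Int)) :=
  ((results.foldl pvOuterStepA PySem.Dict.empty).items).map (fun p => (p.1, p.2.items))

-- ===== PORT B =====
-- pass 1 body: groups.setdefault(k[:-7], []).append(results[k])
def pvGroupStep (g : PySem.Dict String (List (List (String × Int))))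
    (kv : String × List (String × Int)) : PySem.Dict String (List (List (String × Int))) :=
  g.modify (PySem.Str.slice kv.1 none (some (-7))) [] (fun l => l ++ [kv.2])

-- pass 2 per bucket: merged[t] = merged.get(t, 0) + v over the bucket's inner dicts
def pvMergeGroup (inner_dicts : List (List (String × Int))) : List (String × Int) :=
  (inner_dicts.foldl (fun merged inner =>
      inner.foldl (fun m tv => m.insert tv.1 (m.getD tv.1 0 + tv.2)) merged)
    (PySem.Dict.empty : PySem.Dict String Int)).items

def condense_results_by_year_alt (results : List (String × List (String × Int))) : List (String × List (String × Int)) :=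
  ((results.foldl pvGroupStep PySem.Dict.empty).items).map (fun p => (p.1, pvMergeGroup p.2))

-- ===== PRECONDITION & SPEC =====
def Spec_condense_results_by_year (results : List (String × List (String × Int))) (out : List (String × List (String × Int))) : Prop := out = condense_results_by_year_alt results
instance (results : List (String × List (String × Int))) (out : List (String × List (String × Int))) : Decidable (Spec_condense_results_by_year results out) := by unfold Spec_condense_results_by_year; infer_instance

-- ===== CLAIM (what is proved, stated in full; the proofs are below) =====
def Claim_equal_condense_results_by_year : Prop := ∀ (results : List (String × List (String × Int))), Dom_condense_results_by_year results → Spec_condense_results_by_year results (condense_results_by_year results)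

-- ===== LEMMAS AND PROOFS =====

def pvStep1 (m : PySem.Dict String Int) (tv : String × Int) : PySem.Dict String Int :=
  m.insert tv.1 (m.getD tv.1 0 + tv.2)

def pvMrgD (inns : List (List (String × Int))) : PySem.Dict String Int :=
  inns.foldl (fun merged inner => inner.foldl pvStep1 merged) PySem.Dict.empty

def pvMapD (g : PySem.Dict String (List (List (String × Int)))) : PySem.Dict String (PySem.Dict String Int) :=
  PySem.Dict.mk (g.items.map (fun p => (p.1, pvMrgD p.2)))

theorem pv_modify_modify {κ ν : Type} [BEq κ] [LawfulBEq κ] (d : PySem.Dict κ ν) (k : κ) (d0 : ν) (f g : ν → ν) :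
    (d.modify k d0 f).modify k d0 g = d.modify k d0 (fun x => g (f x)) := by
  show (d.insert k (f (d.getD k d0))).insert k (g ((d.insert k (f (d.getD k d0))).getD k d0))
      = d.insert k (g (f (d.getD k d0)))
  rw [PySem.Dict.getD_insert_self, PySem.Dict.insert_insert_self]

theorem pv_modify_id {κ ν : Type} [BEq κ] [LawfulBEq κ] (d : PySem.Dict κ ν) (k : κ) (d0 : ν)
    (h : d.contains k = true) (hnd : d.keys.Nodup) : d.modify k d0 (fun x => x) = d := by
  show d.insert k (d.getD k d0) = d
  apply PySem.Dict.ext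
  rw [PySem.Dict.items_insert_of_contains _ _ h]
  conv_rhs => rw [← List.map_id d.items]
  refine List.map_congr_left (fun p hp => ?_)
  obtain ⟨p1, p2⟩ := p
  by_cases hk : p1 = k
  · subst hk
    have hv := PySem.Dict.getD_of_mem_items d hp hnd d0
    simp [hv]
  · simp [hk]

theorem pv_stepA_fun (part : String) :
    (fun (c : PySem.Dict String (PySem.Dict String Int)) (tv : String × Int) =>
      if (c.getD part PySem.Dict.empty).contains tv.1 = false then
        c.modify part PySem.Dict.empty (fun m => m.insert tv.1 tv.2)
      else
        c.modify part PySem.Dict.empty (fun m => m.insert tv.1 (m.getD tv.1 0 + tv.2)))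
    = (fun c tv => c.modify part PySem.Dict.empty (fun m => pvStep1 m tv)) := by
  funext c tv
  by_cases h : (c.getD part PySem.Dict.empty).contains tv.1 = false
  · simp only [h, if_true]
    show c.insert part ((c.getD part PySem.Dict.empty).insert tv.1 tv.2)
        = c.insert part (pvStep1 (c.getD part PySem.Dict.empty) tv)
    rw [pvStep1, PySem.Dict.getD_of_not_contains _ _ h, Int.zero_add]
  · simp only [h]
    rfl

theorem pv_inner_loop (l : List (String × Int)) (part : String)
    (c : PySem.Dict String (PySem.Dict String Int))
    (hc : c.contains part = true) (hnd : c.keys.Nodup) :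
    l.foldl (fun c tv => c.modify part PySem.Dict.empty (fun m => pvStep1 m tv)) c
      = c.modify part PySem.Dict.empty (fun m => l.foldl pvStep1 m) := by
  induction l generalizing c with
  | nil => exact (pv_modify_id c part PySem.Dict.empty hc hnd).symm
  | cons tv rest ih =>
      show rest.foldl _ (c.modify part PySem.Dict.empty (fun m => pvStep1 m tv)) = _
      rw [ih (c.modify part PySem.Dict.empty (fun m => pvStep1 m tv))
            (by rw [PySem.Dict.contains_modify]; simp)
            (by rw [PySem.Dict.keys_modify, PySem.Dict.keys_insert_of_contains _ _ hc]; exact hnd),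
          pv_modify_modify]
      rfl

theorem pvMapD_items (g : PySem.Dict String (List (List (String × Int)))) :
    (pvMapD g).items = g.items.map (fun p => (p.1, pvMrgD p.2)) := rfl

theorem pvMapD_keys (g : PySem.Dict String (List (List (String × Int)))) :
    (pvMapD g).keys = g.keys := by
  simp [PySem.Dict.keys, pvMapD]

theorem pvMapD_contains (g : PySem.Dict String (List (List (String × Int)))) (k : String) :
    (pvMapD g).contains k = g.contains k := by
  rw [PySem.Dict.contains_eq_decide_mem_keys, PySem.Dict.contains_eq_decide_mem_keys, pvMapD_keys]

theorem pvMrgD_append (inns : List (List (String × Int))) (inner : List (String × Int)) :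
    pvMrgD (inns ++ [inner]) = inner.foldl pvStep1 (pvMrgD inns) := by
  simp [pvMrgD, List.foldl_append]

theorem pvMapD_insert (g : PySem.Dict String (List (List (String × Int))))
    (part : String) (v : List (List (String × Int))) :
    pvMapD (g.insert part v) = (pvMapD g).insert part (pvMrgD v) := by
  apply PySem.Dict.ext
  by_cases h : g.contains part = true
  · rw [pvMapD_items, PySem.Dict.items_insert_of_contains _ _ h,
        PySem.Dict.items_insert_of_contains _ _ (by rw [pvMapD_contains]; exact h),
        pvMapD_items, List.map_map, List.map_map]
    refine List.map_congr_left (fun p hp => ?_)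
    by_cases hk : (p.1 == part) = true
    · simp [Function.comp, hk]
    · simp [Function.comp, hk]
  · have hf : g.contains part = false := by simpa using h
    rw [pvMapD_items, PySem.Dict.items_insert_of_not_contains _ _ hf,
        PySem.Dict.items_insert_of_not_contains _ _ (by rw [pvMapD_contains]; exact hf),
        pvMapD_items, List.map_append]
    rfl

theorem pvMapD_getD (g : PySem.Dict String (List (List (String × Int)))) (part : String)
    (hnd : g.keys.Nodup) (hpart : g.contains part = true) :
    (pvMapD g).getD part PySem.Dict.empty = pvMrgD (g.getD part []) := by
  have hmem : part ∈ g.keys := (PySem.Dict.contains_iff_mem_keys g part).mp hpart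
  obtain ⟨p, hp, hp1⟩ := List.mem_map.mp hmem
  have hpmem : (part, p.2) ∈ g.items := by rw [← hp1]; exact hp
  have h1 : g.getD part [] = p.2 := PySem.Dict.getD_of_mem_items g hpmem hnd []
  have h2 : (part, pvMrgD p.2) ∈ (pvMapD g).items := by
    rw [pvMapD_items]
    exact List.mem_map.mpr ⟨p, hp, by rw [hp1]⟩
  have h3 := PySem.Dict.getD_of_mem_items (pvMapD g) h2 (by rw [pvMapD_keys]; exact hnd) PySem.Dict.empty
  rw [h3, h1]

theorem pv_step (g : PySem.Dict String (List (List (String × Int)))) (hnd : g.keys.Nodup)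
    (kv : String × List (String × Int)) :
    pvOuterStepA (pvMapD g) kv = pvMapD (pvGroupStep g kv) := by
  simp only [pvOuterStepA, pvGroupStep, pv_stepA_fun, pvMapD_contains]
  by_cases hpart : g.contains (PySem.Str.slice kv.1 none (some (-7))) = true
  · simp only [hpart, if_true]
    rw [pv_inner_loop kv.2 _ (pvMapD g) (by rw [pvMapD_contains]; exact hpart)
          (by rw [pvMapD_keys]; exact hnd)]
    show (pvMapD g).insert _ (kv.2.foldl pvStep1
            ((pvMapD g).getD (PySem.Str.slice kv.1 none (some (-7))) PySem.Dict.empty))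
        = pvMapD (g.insert _ (g.getD (PySem.Str.slice kv.1 none (some (-7))) [] ++ [kv.2]))
    rw [pvMapD_getD g _ hnd hpart, ← pvMrgD_append, pvMapD_insert]
  · have hf : g.contains (PySem.Str.slice kv.1 none (some (-7))) = false := by simpa using hpart
    have hnm : PySem.Str.slice kv.1 none (some (-7)) ∉ g.keys := fun hmem =>
      (Bool.eq_false_iff.mp hf) ((PySem.Dict.contains_iff_mem_keys g _).mpr hmem)
    simp only [hf, Bool.false_eq_true, if_false]
    rw [pv_inner_loop kv.2 _ ((pvMapD g).insert _ PySem.Dict.empty)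
          (PySem.Dict.contains_insert_self _ _ _)
          (by rw [PySem.Dict.keys_insert_of_not_contains _ _ (by rw [pvMapD_contains]; exact hf),
                  pvMapD_keys]
              simp [List.nodup_append, hnd]
              intro a ha hae
              exact hnm (hae ▸ ha))]
    show ((pvMapD g).insert _ PySem.Dict.empty).insert _ (kv.2.foldl pvStep1
            (((pvMapD g).insert (PySem.Str.slice kv.1 none (some (-7))) PySem.Dict.empty).getD
              (PySem.Str.slice kv.1 none (some (-7))) PySem.Dict.empty))
        = pvMapD (g.insert _ (g.getD (PySem.Str.slice kv.1 none (some (-7))) [] ++ [kv.2]))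
    rw [PySem.Dict.getD_insert_self, PySem.Dict.insert_insert_self,
        PySem.Dict.getD_of_not_contains _ _ hf, List.nil_append, pvMapD_insert]
    rfl

theorem pv_nodup_stepB (g : PySem.Dict String (List (List (String × Int)))) (hnd : g.keys.Nodup)
    (kv : String × List (String × Int)) : (pvGroupStep g kv).keys.Nodup := by
  unfold pvGroupStep
  rw [PySem.Dict.keys_modify]
  by_cases h : g.contains (PySem.Str.slice kv.1 none (some (-7))) = true
  · rw [PySem.Dict.keys_insert_of_contains _ _ h]; exact hnd
  · have hf : g.contains (PySem.Str.slice kv.1 none (some (-7))) = false := by simpa using h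
    have hnm : PySem.Str.slice kv.1 none (some (-7)) ∉ g.keys := fun hmem =>
      (Bool.eq_false_iff.mp hf) ((PySem.Dict.contains_iff_mem_keys g _).mpr hmem)
    rw [PySem.Dict.keys_insert_of_not_contains _ _ hf]
    simp [List.nodup_append, hnd]
    intro a ha hae
    exact hnm (hae ▸ ha)

theorem pv_main (rs : List (String × List (String × Int)))
    (g : PySem.Dict String (List (List (String × Int)))) (hnd : g.keys.Nodup) :
    rs.foldl pvOuterStepA (pvMapD g) = pvMapD (rs.foldl pvGroupStep g) := by
  induction rs generalizing g with
  | nil => rfl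
  | cons kv rest ih =>
      show rest.foldl pvOuterStepA (pvOuterStepA (pvMapD g) kv) = _
      rw [pv_step g hnd kv]
      exact ih _ (pv_nodup_stepB g hnd kv)

-- ===== VERDICT (by name: the statement is the Claim_ definition above) =====
theorem condense_results_by_year_spec : Claim_equal_condense_results_by_year := by
  intro results _
  unfold Spec_condense_results_by_year condense_results_by_year condense_results_by_year_alt
  rw [show (PySem.Dict.empty : PySem.Dict String (PySem.Dict String Int)) = pvMapD PySem.Dict.empty from rfl,
      pv_main results PySem.Dict.empty PySem.Dict.nodup_keys_empty,
      pvMapD_items, List.map_map]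
  rfl
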